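-- pv_equiv track=rewrite | github.com/quriegenAK/quriegen-aivc | data/phase6_5g_2/classifiers/dogma_classifier_v3.py | classify_by_token
-- ===== SOURCE A (Python) =====
-- CONFIDENCE = ("HIGH", "MEDIUM", "LOW", "AMBIGUOUS", "UNKNOWN")
--
-- def classif(value=None, evidence=None, source_field=None, confidence="UNKNOWN"):
--     assert confidence in CONFIDENCE
--     return {"value": value, "evidence": evidence,
--             "source_field": source_field, "confidence": confidence}
--
-- def classify_by_token(tokens, token_map, source_field):
--     hits = {name for name, toks in token_map.items() if tokens & toks}
--     if len(hits) == 1: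
--         name = list(hits)[0]
--         matched = sorted(tokens & token_map[name])[0]
--         return classif(value=name, evidence=f"token:{matched}",
--                        source_field=source_field, confidence="MEDIUM")
--     if len(hits) > 1:
--         return classif(evidence=f"multi-match:{sorted(hits)}",
--                        source_field=source_field, confidence="AMBIGUOUS")
--     return classif(confidence="UNKNOWN")
-- ===== SOURCE B (Python) =====
-- CONFIDENCE = ("HIGH", "MEDIUM", "LOW", "AMBIGUOUS", "UNKNOWN")
--
-- def classif(value=None, evidence=None, source_field=None, confidence="UNKNOWN"):
--     assert confidence in CONFIDENCE
--     return {"value": value, "evidence": evidence,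
--             "source_field": source_field, "confidence": confidence}
--
-- def classify_by_token(tokens, token_map, source_field):
--     # inverted index: token -> list of names whose token set contains it
--     index = {}
--     for name, toks in token_map.items():
--         for t in toks:
--             index.setdefault(t, []).append(name)
--     hits = set()
--     matched = {}  # name -> lexicographically smallest input token that hit it
--     for t in tokens:
--         for name in index.get(t, []):
--             hits.add(name)
--             if name not in matched or t < matched[name]:
--                 matched[name] = t
--     if not hits:
--         return classif()
--     if len(hits) > 1:
--         return classif(evidence=f"multi-match:{sorted(hits)}",
--                        source_field=source_field, confidence="AMBIGUOUS")
--     (name,) = hits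
--     return classif(value=name, evidence=f"token:{matched[name]}",
--                    source_field=source_field, confidence="MEDIUM")
-- ===== Notes on version B (the rewrite author's own statement) =====
-- stated objective: alternative
-- what changed: B replaces A's per-name scan (intersecting every name's token set with the input) by an inverted index from token to names, built once from token_map and then probed once per input token while tracking each name's lexicographically smallest matching token.
import Mathlib
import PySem

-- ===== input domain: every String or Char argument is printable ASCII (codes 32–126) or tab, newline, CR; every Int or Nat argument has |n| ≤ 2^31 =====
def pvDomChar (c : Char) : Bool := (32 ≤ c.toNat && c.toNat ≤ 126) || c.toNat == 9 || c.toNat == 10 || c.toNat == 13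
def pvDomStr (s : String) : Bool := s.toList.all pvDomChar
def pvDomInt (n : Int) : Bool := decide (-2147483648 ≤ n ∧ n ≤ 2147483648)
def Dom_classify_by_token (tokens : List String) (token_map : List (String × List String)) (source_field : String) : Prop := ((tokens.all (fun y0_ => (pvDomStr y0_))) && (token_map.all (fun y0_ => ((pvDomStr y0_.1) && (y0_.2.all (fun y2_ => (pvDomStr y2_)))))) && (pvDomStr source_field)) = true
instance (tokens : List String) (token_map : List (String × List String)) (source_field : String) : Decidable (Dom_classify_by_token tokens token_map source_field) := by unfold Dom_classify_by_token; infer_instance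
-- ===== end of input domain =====

-- B replaces A's per-name scan of token_map by an inverted index token → names, traversed once per input
-- token (objective: alternative, same asymptotic cost); return values proved identical on the whole domain.

-- ===== PORT A =====
-- shared module helper classif (the assert is a no-op: the confidence argument is always a literal member of CONFIDENCE)
def classif (value evidence source_field : Option String) (confidence : String) : List (String × Option String) :=
  [("value", value), ("evidence", evidence), ("source_field", source_field), ("confidence", some confidence)]

-- repr(s) for the strings admitted by Dom (printable ASCII plus tab/newline/CR): exact there
def pyReprStr (s : String) : String :=
  let cs := s.toList
  let q : Char := if cs.contains '\'' && !(cs.contains '"') then '"' else '\''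
  String.ofList (q :: (cs.flatMap (fun c =>
    if c = '\\' then ['\\', '\\']
    else if c = q then ['\\', q]
    else if c = '\t' then ['\\', 't']
    else if c = '\n' then ['\\', 'n']
    else if c = '\r' then ['\\', 'r']
    else [c])) ++ [q])

-- f"{xs}" for a list of strings: Python's str of a list
def pyReprStrList (xs : List String) : String :=
  "[" ++ String.intercalate ", " (xs.map pyReprStr) ++ "]"

def classify_by_token (tokens : List String) (token_map : List (String × List String)) (source_field : String) : List (String × Option String) :=
  let tmd := PySem.Dict.ofList token_map
  let tset : PySem.Set String := PySem.Set.ofList tokens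
  -- hits = {name for name, toks in token_map.items() if tokens & toks}
  let hits : PySem.Set String :=
    PySem.Set.ofList (((tmd.items.filter
      (fun p => !(PySem.Set.inter tset (PySem.Set.ofList p.2)).isEmpty))).map (fun p => p.1))
  if hits.length = 1 then
    let name := hits.headD ""
    let matched := (PySem.List.sorted (PySem.Set.inter tset (PySem.Set.ofList (tmd.getD name []))) (fun x => x) false).headD ""
    classif (some name) (some ("token:" ++ matched)) (some source_field) "MEDIUM"
  else if hits.length > 1 then
    classif none (some ("multi-match:" ++ pyReprStrList (PySem.List.sorted hits (fun x => x) false))) (some source_field) "AMBIGUOUS"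
  else
    classif none none none "UNKNOWN"

-- ===== PORT B =====
def classify_by_token_alt (tokens : List String) (token_map : List (String × List String)) (source_field : String) : List (String × Option String) :=
  let tmd := PySem.Dict.ofList token_map
  -- index = {}; for name, toks in token_map.items(): for t in toks: index.setdefault(t, []).append(name)
  let index : PySem.Dict String (List String) :=
    tmd.items.foldl (fun d p =>
      (PySem.Set.ofList p.2).foldl (fun d t => d.modify t [] (fun l => l ++ [p.1])) d)
      PySem.Dict.empty
  -- hits = set(); matched = {}; for t in tokens: for name in index.get(t, []): …
  let st : PySem.Set String × PySem.Dict String String :=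
    (PySem.Set.ofList tokens).foldl (fun st t =>
      (index.getD t []).foldl (fun st name =>
        (PySem.Set.add st.1 name,
         if !(st.2.contains name) || t < st.2.getD name "" then st.2.insert name t else st.2)) st)
      (PySem.Set.empty, PySem.Dict.empty)
  let hits := st.1
  let matched := st.2
  if hits.isEmpty then
    classif none none none "UNKNOWN"
  else if hits.length > 1 then
    classif none (some ("multi-match:" ++ pyReprStrList (PySem.List.sorted hits (fun x => x) false))) (some source_field) "AMBIGUOUS"
  else
    let name := hits.headD ""
    classif (some name) (some ("token:" ++ matched.getD name "")) (some source_field) "MEDIUM"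

-- ===== PRECONDITION & SPEC =====
def Spec_classify_by_token (tokens : List String) (token_map : List (String × List String)) (source_field : String) (out : List (String × Option String)) : Prop := out = classify_by_token_alt tokens token_map source_field
instance (tokens : List String) (token_map : List (String × List String)) (source_field : String) (out : List (String × Option String)) : Decidable (Spec_classify_by_token tokens token_map source_field out) := by unfold Spec_classify_by_token; infer_instance

-- ===== CLAIM (what is proved, stated in full; the proofs are below) =====
def Claim_equal_classify_by_token : Prop := ∀ (tokens : List String) (token_map : List (String × List String)) (source_field : String), Dom_classify_by_token tokens token_map source_field → Spec_classify_by_token tokens token_map source_field (classify_by_token tokens token_map source_field)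

-- ===== LEMMAS AND PROOFS =====

-- the min-update B's matched loop performs on the optional current best token of a name
def updMin (t : String) (o : Option String) : Option String :=
  some (match o with | none => t | some v => if t < v then t else v)

-- B's matched-dict step for one name hit by token t
def mstep (t : String) (m : PySem.Dict String String) (n : String) : PySem.Dict String String :=
  if !(m.contains n) || t < m.getD n "" then m.insert n t else m

-- a nodup list filtered for equality with t is [t] or []
lemma filter_beq_of_nodup (us : List String) (t : String) (h : us.Nodup) :
    us.filter (fun u => u == t) = if us.contains t then [t] else [] := by
  induction us with
  | nil => simp
  | cons u us ih =>
    rw [List.nodup_cons] at h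
    obtain ⟨hu, hnd⟩ := h
    rw [List.filter_cons]
    by_cases hut : u = t
    · subst hut
      have hc : us.contains u = false := by
        simpa [List.contains_iff_mem] using hu
      simp [ih hnd, hu]
    · simp [ih hnd, Ne.symm hut, hut]

-- effect on slot t of appending name n under every token of a nodup token list
lemma inner_idx (us : List String) (n : String) (d : PySem.Dict String (List String)) (t : String)
    (h : us.Nodup) :
    (us.foldl (fun d u => d.modify u [] (fun l => l ++ [n])) d).getD t []
      = d.getD t [] ++ (if us.contains t then [n] else []) := by
  have hmap : us.foldl (fun d u => d.modify u [] (fun l => l ++ [n])) d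
      = (us.map (fun u => (u, n))).foldl (fun d p => d.modify p.1 [] (fun l => l ++ [p.2])) d := by
    rw [List.foldl_map]
  rw [hmap, PySem.Dict.getD_foldl_modify_append, List.filter_map]
  have : (List.filter ((fun p : String × String => p.1 == t) ∘ fun u => (u, n)) us)
      = us.filter (fun u => u == t) := by rfl
  rw [this, filter_beq_of_nodup us t h]
  split <;> simp

-- the inverted index: slot t holds the names whose token set contains t, in token_map order
lemma idx_getD (items : List (String × List String)) (d : PySem.Dict String (List String)) (t : String) :
    (items.foldl (fun d p => (PySem.Set.ofList p.2).foldl (fun d u => d.modify u [] (fun l => l ++ [p.1])) d) d).getD t []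
      = d.getD t [] ++ (items.filter (fun p => (PySem.Set.ofList p.2).contains t)).map (fun p => p.1) := by
  induction items generalizing d with
  | nil => simp
  | cons p items ih =>
    rw [List.foldl_cons, ih, inner_idx _ _ _ _ (PySem.Set.nodup_ofList p.2), List.filter_cons]
    by_cases hm : t ∈ p.2
    · have hc : (PySem.Set.ofList p.2).contains t = true :=
        (PySem.Set.contains_iff _ _).mpr ((PySem.Set.mem_ofList p.2 t).mpr hm)
    
      simp [hm]
    · have hc : (PySem.Set.ofList p.2).contains t = false := by
        rw [Bool.eq_false_iff]
        intro hcc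
        exact hm ((PySem.Set.mem_ofList p.2 t).mp ((PySem.Set.contains_iff _ _).mp hcc))
      simp [hm]

-- B's paired loop splits into the hits loop and the matched loop
lemma st_split (l : List String) (idx : PySem.Dict String (List String))
    (a : PySem.Set String) (b : PySem.Dict String String) :
    l.foldl (fun st t =>
        (idx.getD t []).foldl (fun st name =>
          (PySem.Set.add st.1 name,
           if !(st.2.contains name) || t < st.2.getD name "" then st.2.insert name t else st.2)) st) (a, b)
      = (l.foldl (fun h t => (idx.getD t []).foldl (fun h n => PySem.Set.add h n) h) a,
         l.foldl (fun m t => (idx.getD t []).foldl (fun m n => mstep t m n) m) b) := by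
  induction l generalizing a b with
  | nil => rfl
  | cons t l ih =>
    simp only [List.foldl_cons]
    rw [show ((idx.getD t []).foldl (fun st name =>
          (PySem.Set.add st.1 name,
           if !(st.2.contains name) || t < st.2.getD name "" then st.2.insert name t else st.2)) (a, b))
        = ((idx.getD t []).foldl (fun h n => PySem.Set.add h n) a,
           (idx.getD t []).foldl (fun m n => mstep t m n) b) from
      PySem.List.foldl_prod_mk (fun h n => PySem.Set.add h n) (fun m n => mstep t m n) _ a b]
    exact ih _ _

-- membership in B's hits set
lemma hitsB_mem (l : List String) (idx : PySem.Dict String (List String)) (h0 : PySem.Set String) (x : String) :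
    x ∈ l.foldl (fun h t => (idx.getD t []).foldl (fun h n => PySem.Set.add h n) h) h0
      ↔ x ∈ h0 ∨ ∃ t ∈ l, x ∈ idx.getD t [] := by
  induction l generalizing h0 with
  | nil => simp
  | cons t l ih =>
    simp only [List.foldl_cons, ih, PySem.Set.mem_foldl_add (f := fun n : String => n)]
    constructor
    · rintro (h | h)
      · rcases h with h | ⟨b, hb, rfl⟩
        · exact Or.inl h
        · exact Or.inr ⟨t, by simp, hb⟩
      · rcases h with ⟨u, hu, hx⟩; exact Or.inr ⟨u, by simp [hu], hx⟩
    · rintro (h | ⟨u, hu, hx⟩)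
      · exact Or.inl (Or.inl h)
      · rcases List.mem_cons.mp hu with rfl | hu
        · exact Or.inl (Or.inr ⟨x, hx, rfl⟩)
        · exact Or.inr ⟨u, hu, hx⟩

-- B's hits set stays nodup
lemma hitsB_nodup (l : List String) (idx : PySem.Dict String (List String)) (h0 : PySem.Set String)
    (h : h0.Nodup) :
    (l.foldl (fun h t => (idx.getD t []).foldl (fun h n => PySem.Set.add h n) h) h0).Nodup := by
  induction l generalizing h0 with
  | nil => exact h
  | cons t l ih =>
    refine ih _ ?_
    have : ∀ (ns : List String) (s : PySem.Set String), s.Nodup → (ns.foldl (fun h n => PySem.Set.add h n) s).Nodup := by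
      intro ns
      induction ns with
      | nil => intro s hs; exact hs
      | cons n ns ih2 => intro s hs; exact ih2 _ (PySem.Set.nodup_add s n hs)
    exact this _ _ h

-- a name absent from ns is untouched by the inner matched loop
lemma mstep_fold_get?_not_mem (t : String) (ns : List String) (m : PySem.Dict String String) (x : String)
    (hx : x ∉ ns) :
    (ns.foldl (fun m n => mstep t m n) m).get? x = m.get? x := by
  induction ns generalizing m with
  | nil => rfl
  | cons n ns ih =>
    have hnx : x ≠ n := fun h => hx (h ▸ List.mem_cons_self)
    have := ih (m := mstep t m n) (fun h => hx (List.mem_cons_of_mem _ h))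
    rw [List.foldl_cons, this]
    unfold mstep
    split
    · exact PySem.Dict.get?_insert_of_ne m _ hnx
    · rfl

-- effect of the inner matched loop on slot x
lemma mstep_fold_get? (t : String) (ns : List String) (m : PySem.Dict String String) (x : String)
    (hnd : ns.Nodup) :
    (ns.foldl (fun m n => mstep t m n) m).get? x
      = if ns.contains x then updMin t (m.get? x) else m.get? x := by
  induction ns generalizing m with
  | nil => rfl
  | cons n ns ih =>
    rw [List.nodup_cons] at hnd
    obtain ⟨hn, hnd⟩ := hnd
    by_cases hx : x = n
    · subst hx
      have hxns : x ∉ ns := by simpa using hn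
      rw [List.foldl_cons, mstep_fold_get?_not_mem t ns _ x hxns]
      have : (mstep t m x).get? x = updMin t (m.get? x) := by
        cases hg : m.get? x with
        | none =>
          have hc : m.contains x = false := by rw [PySem.Dict.contains_eq_isSome_get?, hg]; rfl
          simp [mstep, updMin, hc, PySem.Dict.get?_insert_self]
        | some v =>
          have hc : m.contains x = true := by rw [PySem.Dict.contains_eq_isSome_get?, hg]; rfl
          have hd : m.getD x "" = v := by rw [PySem.Dict.getD_eq_get?_getD, hg]; rfl
          by_cases hlt : t < v
          · simp [mstep, updMin, hc, hd, hlt, PySem.Dict.get?_insert_self]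
          · simp [mstep, updMin, hg, hc, hd, hlt]
      simp [this]
    · have hstep : (mstep t m n).get? x = m.get? x := by
        unfold mstep
        split
        · exact PySem.Dict.get?_insert_of_ne m _ hx
        · rfl
      rw [List.foldl_cons, ih _ hnd, hstep]
      have : ((n :: ns).contains x) = ns.contains x := by
        simp [hx]
      rw [this]

-- the outer matched loop: slot x is the fold of updMin over the tokens whose index slot names x
lemma matched_get? (l : List String) (idx : PySem.Dict String (List String))
    (hnd : ∀ t, (idx.getD t []).Nodup) (m : PySem.Dict String String) (x : String) :
    (l.foldl (fun m t => (idx.getD t []).foldl (fun m n => mstep t m n) m) m).get? x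
      = (l.filter (fun t => (idx.getD t []).contains x)).foldl (fun o t => updMin t o) (m.get? x) := by
  induction l generalizing m with
  | nil => rfl
  | cons t l ih =>
    rw [List.foldl_cons, ih, List.filter_cons]
    rw [mstep_fold_get? t _ m x (hnd t)]
    split <;> simp_all

-- the fold of updMin from none computes a minimum
lemma updMin_fold_spec (l : List String) (o : Option String) (v : String)
    (h : l.foldl (fun o t => updMin t o) o = some v) :
    (v ∈ l ∨ o = some v) ∧ (∀ y ∈ l, v ≤ y) ∧ (∀ w, o = some w → v ≤ w) := by
  induction l generalizing o with
  | nil => exact ⟨Or.inr h, by simp, fun w hw => le_of_eq (by rw [List.foldl_nil] at h; rw [h] at hw; exact Option.some.inj hw)⟩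
  | cons t l ih =>
    rw [List.foldl_cons] at h
    obtain ⟨h1, h2, h3⟩ := ih _ h
    cases o with
    | none =>
      have hvt : v ≤ t := h3 t rfl
      refine ⟨?_, ?_, by simp⟩
      · rcases h1 with h1 | h1
        · exact Or.inl (List.mem_cons_of_mem _ h1)
        · exact Or.inl (by simp [updMin] at h1; simp [h1])
      · intro y hy
        rcases List.mem_cons.mp hy with rfl | hy
        · exact hvt
        · exact h2 y hy
    | some w =>
      by_cases htw : t < w
      · have hu : updMin t (some w) = some t := by simp [updMin, htw]
        have hvt : v ≤ t := h3 t hu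
        have hvw : v ≤ w := le_trans hvt (le_of_lt htw)
        refine ⟨?_, ?_, ?_⟩
        · rcases h1 with h1 | h1
          · exact Or.inl (List.mem_cons_of_mem _ h1)
          · rw [hu] at h1
            exact Or.inl (by simp [Option.some.inj h1])
        · intro y hy
          rcases List.mem_cons.mp hy with rfl | hy
          · exact hvt
          · exact h2 y hy
        · intro w' hw'
          exact (Option.some.inj hw') ▸ hvw
      · have hu : updMin t (some w) = some w := by simp [updMin, htw]
        have hvw : v ≤ w := h3 w hu
        have hvt : v ≤ t := le_trans hvw (le_of_not_gt htw)
        refine ⟨?_, ?_, ?_⟩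
        · rcases h1 with h1 | h1
          · exact Or.inl (List.mem_cons_of_mem _ h1)
          · rw [hu] at h1
            exact Or.inr (by rw [Option.some.inj h1])
        · intro y hy
          rcases List.mem_cons.mp hy with rfl | hy
          · exact hvt
          · exact h2 y hy
        · intro w' hw'
          exact (Option.some.inj hw') ▸ hvw

lemma updMin_fold_isSome (l : List String) (o : Option String) (h : l ≠ [] ∨ o.isSome) :
    (l.foldl (fun o t => updMin t o) o).isSome := by
  induction l generalizing o with
  | nil => simpa using h.resolve_left (fun h2 => h2 rfl)
  | cons t l ih => rw [List.foldl_cons]; exact ih _ (Or.inr rfl)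

-- the two hits computations produce the same set of names
lemma hits_perm (tokens : List String) (token_map : List (String × List String)) :
    (PySem.Set.ofList ((((PySem.Dict.ofList token_map).items.filter
        (fun p => !(PySem.Set.inter (PySem.Set.ofList tokens) (PySem.Set.ofList p.2)).isEmpty))).map (fun p => p.1))).Perm
      ((PySem.Set.ofList tokens).foldl (fun h t =>
        (((PySem.Dict.ofList token_map).items.foldl (fun d p =>
            (PySem.Set.ofList p.2).foldl (fun d u => d.modify u [] (fun l => l ++ [p.1])) d)
          PySem.Dict.empty).getD t []).foldl (fun h n => PySem.Set.add h n) h) PySem.Set.empty) := by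
  have hidx : ∀ t : String,
      (((PySem.Dict.ofList token_map).items.foldl (fun d p =>
          (PySem.Set.ofList p.2).foldl (fun d u => d.modify u [] (fun l => l ++ [p.1])) d)
        PySem.Dict.empty).getD t [])
      = ((PySem.Dict.ofList token_map).items.filter
          (fun p => (PySem.Set.ofList p.2).contains t)).map (fun p => p.1) := by
    intro t
    rw [idx_getD]
    simp
  refine (List.perm_ext_iff_of_nodup (PySem.Set.nodup_ofList _) (hitsB_nodup _ _ _ List.nodup_nil)).mpr ?_
  intro x
  rw [hitsB_mem]
  simp only [hidx, PySem.Set.mem_ofList, List.mem_map, List.mem_filter,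
    PySem.Set.mem_inter, PySem.Set.contains_iff, Bool.not_eq_eq_eq_not, Bool.not_true,
    List.isEmpty_eq_false_iff_exists_mem, List.not_mem_nil, false_or]
  constructor
  · rintro ⟨p, ⟨hp, u, hu1, hu2⟩, rfl⟩
    exact ⟨u, hu1, p, ⟨hp, hu2⟩, rfl⟩
  · rintro ⟨t, ht, p, ⟨hp, htp⟩, rfl⟩
    exact ⟨p, ⟨hp, t, ht, htp⟩, rfl⟩

-- for the unique hit a, A's smallest shared token equals B's recorded matched token
lemma matched_eq (tokens : List String) (token_map : List (String × List String)) (a : String)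
    (ha : a ∈ PySem.Set.ofList ((((PySem.Dict.ofList token_map).items.filter
        (fun p => !(PySem.Set.inter (PySem.Set.ofList tokens) (PySem.Set.ofList p.2)).isEmpty))).map (fun p => p.1))) :
    (PySem.List.sorted (PySem.Set.inter (PySem.Set.ofList tokens)
        (PySem.Set.ofList ((PySem.Dict.ofList token_map).getD a []))) (fun x => x) false).headD ""
      = ((PySem.Set.ofList tokens).foldl (fun m t =>
          ((((PySem.Dict.ofList token_map).items.foldl (fun d p =>
              (PySem.Set.ofList p.2).foldl (fun d u => d.modify u [] (fun l => l ++ [p.1])) d)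
            PySem.Dict.empty).getD t [])).foldl (fun m n => mstep t m n) m) PySem.Dict.empty).getD a "" := by
  have hkeys : (PySem.Dict.ofList token_map).keys.Nodup := PySem.Dict.nodup_keys_ofList token_map
  have hidx : ∀ t : String,
      (((PySem.Dict.ofList token_map).items.foldl (fun d p =>
          (PySem.Set.ofList p.2).foldl (fun d u => d.modify u [] (fun l => l ++ [p.1])) d)
        PySem.Dict.empty).getD t [])
      = ((PySem.Dict.ofList token_map).items.filter
          (fun p => (PySem.Set.ofList p.2).contains t)).map (fun p => p.1) := by
    intro t
    rw [idx_getD]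
    simp
  have hslotnd : ∀ t : String,
      ((((PySem.Dict.ofList token_map).items.foldl (fun d p =>
          (PySem.Set.ofList p.2).foldl (fun d u => d.modify u [] (fun l => l ++ [p.1])) d)
        PySem.Dict.empty).getD t [])).Nodup := by
    intro t
    rw [hidx t]
    have hs : ((List.filter (fun p => (PySem.Set.ofList p.2).contains t) (PySem.Dict.ofList token_map).items).map (fun p : String × List String => p.1)).Sublist
        ((PySem.Dict.ofList token_map).items.map (fun p => p.1)) :=
      List.Sublist.map (fun p : String × List String => p.1) List.filter_sublist
    exact (by simpa [PySem.Dict.keys] using hkeys : ((PySem.Dict.ofList token_map).items.map (fun p => p.1)).Nodup).sublist hs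
  -- the unique hit: its token list
  simp only [PySem.Set.mem_ofList, List.mem_map, List.mem_filter] at ha
  obtain ⟨p, ⟨hp, hcond⟩, hpa⟩ := ha
  obtain ⟨p1, p2⟩ := p
  simp only at hpa hcond
  subst hpa
  have hget : (PySem.Dict.ofList token_map).get? p1 = some p2 :=
    PySem.Dict.get?_of_mem_items _ hp hkeys
  have hgetD : (PySem.Dict.ofList token_map).getD p1 [] = p2 := by
    rw [PySem.Dict.getD_eq_get?_getD, hget]; rfl
  rw [hgetD]
  -- the intersection is nonempty
  have hne : PySem.Set.inter (PySem.Set.ofList tokens) (PySem.Set.ofList p2) ≠ [] := by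
    intro h
    rw [h] at hcond
    simp at hcond
  -- A's side: head of the sorted intersection is its minimum
  obtain ⟨m, rest, hsort⟩ : ∃ m rest, PySem.List.sorted (PySem.Set.inter (PySem.Set.ofList tokens) (PySem.Set.ofList p2)) (fun x => x) false = m :: rest := by
    cases hs : PySem.List.sorted (PySem.Set.inter (PySem.Set.ofList tokens) (PySem.Set.ofList p2)) (fun x => x) false with
    | nil => exact absurd ((PySem.List.sorted_eq_nil_iff _ _ _).mp hs) hne
    | cons m rest => exact ⟨m, rest, rfl⟩
  have hmmem : m ∈ PySem.Set.inter (PySem.Set.ofList tokens) (PySem.Set.ofList p2) :=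
    (PySem.List.sorted_perm _ _ _).mem_iff.mp (hsort ▸ List.mem_cons_self)
  have hmmin := PySem.List.key_head_sorted_le _ (fun x : String => x) hsort
  -- B's side: the filter defining matched's slot is exactly the intersection
  have hrel : (PySem.Set.ofList tokens).filter (fun t =>
      ((((PySem.Dict.ofList token_map).items.foldl (fun d p =>
          (PySem.Set.ofList p.2).foldl (fun d u => d.modify u [] (fun l => l ++ [p.1])) d)
        PySem.Dict.empty).getD t [])).contains p1)
      = PySem.Set.inter (PySem.Set.ofList tokens) (PySem.Set.ofList p2) := by
    show _ = (PySem.Set.ofList tokens).filter (fun t => (PySem.Set.ofList p2).contains t)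
    apply List.filter_congr
    intro t _
    rw [Bool.eq_iff_iff]
    simp only [List.contains_iff_mem, hidx t, List.mem_map, List.mem_filter]
    constructor
    · rintro ⟨q, ⟨hq, hqt⟩, hq1⟩
      obtain ⟨q1, q2⟩ := q
      simp only at hq1 hqt
      subst hq1
      have : q2 = p2 := by
        have := PySem.Dict.get?_of_mem_items _ hq hkeys
        rw [hget] at this
        exact (Option.some.inj this).symm
      subst this
      simpa [PySem.Set.mem_ofList] using hqt
    · intro htp
      refine ⟨(p1, p2), ⟨PySem.Dict.mem_items_of_get?_eq_some _ hget, ?_⟩, rfl⟩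
      simpa [PySem.Set.contains_iff] using htp
  -- evaluate matched's slot
  have hmg := matched_get? (PySem.Set.ofList tokens)
    ((PySem.Dict.ofList token_map).items.foldl (fun d p =>
        (PySem.Set.ofList p.2).foldl (fun d u => d.modify u [] (fun l => l ++ [p.1])) d)
      PySem.Dict.empty) hslotnd PySem.Dict.empty p1
  rw [PySem.Dict.get?_empty, hrel] at hmg
  have hsome := updMin_fold_isSome (PySem.Set.inter (PySem.Set.ofList tokens) (PySem.Set.ofList p2)) none (Or.inl hne)
  obtain ⟨v, hv⟩ := Option.isSome_iff_exists.mp hsome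
  obtain ⟨hv1, hv2, _⟩ := updMin_fold_spec _ _ _ hv
  have hvmem : v ∈ PySem.Set.inter (PySem.Set.ofList tokens) (PySem.Set.ofList p2) := by
    rcases hv1 with h | h
    · exact h
    · cases h
  have hveq : v = m := le_antisymm (hv2 m hmmem) (hmmin v hvmem)
  rw [hsort, PySem.Dict.getD_eq_get?_getD, hmg, hv, hveq]
  rfl

-- the common branch structure: a permutation of the hits and agreement on the single-hit
-- evidence make the two outputs equal
lemma branch_core (LA LB : List String) (sf : String) (hperm : LA.Perm LB)
    (fA fB : String → String) (hf : ∀ a ∈ LA, fA a = fB a) :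
    (if LA.length = 1 then
        classif (some (LA.headD "")) (some ("token:" ++ fA (LA.headD ""))) (some sf) "MEDIUM"
      else if LA.length > 1 then
        classif none (some ("multi-match:" ++ pyReprStrList (PySem.List.sorted LA (fun x => x) false))) (some sf) "AMBIGUOUS"
      else classif none none none "UNKNOWN")
    = (if LB.isEmpty then classif none none none "UNKNOWN"
      else if LB.length > 1 then
        classif none (some ("multi-match:" ++ pyReprStrList (PySem.List.sorted LB (fun x => x) false))) (some sf) "AMBIGUOUS"
      else classif (some (LB.headD "")) (some ("token:" ++ fB (LB.headD ""))) (some sf) "MEDIUM") := by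
  have hlen := hperm.length_eq
  rcases LA with _ | ⟨a, _ | ⟨b, rest⟩⟩
  · have hB : LB = [] := hperm.nil_eq.symm
    subst hB
    simp
  · have hB : LB = [a] := List.perm_singleton.mp hperm.symm
    subst hB
    simp [hf a (by simp)]
  · have hB : LB ≠ [] := by
      intro h
      rw [h] at hlen
      simp at hlen
    have hBlen : LB.length > 1 := by
      rw [← hlen]
      simp
    have hsorted : PySem.List.sorted (a :: b :: rest) (fun x : String => x) false
        = PySem.List.sorted LB (fun x => x) false :=
      (PySem.List.sorted_id_eq_sorted_id_iff_perm _ _).mpr hperm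
    simp [hB, hBlen, hsorted, List.isEmpty_iff]

-- ===== VERDICT (by name: the statement is the Claim_ definition above) =====
set_option maxHeartbeats 1000000 in
theorem classify_by_token_spec : Claim_equal_classify_by_token := by
  intro tokens token_map source_field _hdom
  unfold Spec_classify_by_token
  have hperm := hits_perm tokens token_map
  have hmatched := matched_eq tokens token_map
  simp only [classify_by_token, classify_by_token_alt, st_split]
  exact branch_core _ _ _ hperm _ _ hmatched
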